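-- pv_equiv track=rewrite | github.com/SlothNJ/YandexLyceumWebProject | tools/functions.py | verify_data
-- ===== SOURCE A (Python) =====
-- def verify_data(data, datatype):
--     symbols = 'qwertyuiopasdfghjklzxcvbnm0123456789_-'
--     email_symbols = symbols + '.@'
--     password_symbols = symbols + '.@!#$%^&*(),/'
--     if len(data) < 64 and data:
--         if datatype == 'email':
--             if '@' not in data:
--                 return False
--             for el in data:
--                 if el not in email_symbols:
--                     return False
--         elif datatype == 'username':
--             for el in data:
--                 if el not in symbols:
--                     return False
--         elif datatype == 'password':
--             for el in data:
--                 if el not in password_symbols: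
--                     return False
--         return True
--     return False
-- ===== SOURCE B (Python) =====
-- import re
--
-- _RE = {
--     'email': re.compile(r'[a-z0-9_.@-]*\Z'),
--     'username': re.compile(r'[a-z0-9_-]*\Z'),
--     'password': re.compile(r'[a-z0-9_.@!#$%^&*(),/-]*\Z'),
-- }
--
-- def verify_data(data, datatype):
--     if not data or len(data) >= 64:
--         return False
--     if datatype == 'email':
--         return '@' in data and _RE['email'].match(data) is not None
--     pat = _RE.get(datatype)
--     return pat is None or pat.match(data) is not None
-- ===== Notes on version B (the rewrite author's own statement) =====
-- stated objective: idiomatic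
-- what changed: Replaced A's explicit per-character rejection loops over allowed-symbol strings by precompiled regex character-class fullmatch checks ('[a-z0-9_...]*'), with the '@' requirement and the length/empty guard kept outside the regex.
import Mathlib
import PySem

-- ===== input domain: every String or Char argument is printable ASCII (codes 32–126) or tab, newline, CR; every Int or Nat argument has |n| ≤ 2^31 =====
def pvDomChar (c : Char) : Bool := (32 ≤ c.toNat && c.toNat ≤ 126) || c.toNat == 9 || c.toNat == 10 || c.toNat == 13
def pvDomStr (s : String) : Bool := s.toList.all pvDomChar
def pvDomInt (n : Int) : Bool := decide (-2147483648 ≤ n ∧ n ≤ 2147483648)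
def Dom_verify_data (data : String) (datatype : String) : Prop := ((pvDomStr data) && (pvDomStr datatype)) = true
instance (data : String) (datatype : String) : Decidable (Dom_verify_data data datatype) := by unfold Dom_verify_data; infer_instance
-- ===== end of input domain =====

-- B replaces A's explicit per-character rejection loops by regex-style character-class
-- matching (re.fullmatch over '[a-z0-9_...]*'); objective: idiomatic, same cost.
-- Both programs are pure (no mutation); equivalence is about the return value.

-- ===== PORT A =====
-- A's allowed-symbol strings, kept as the same concatenations A builds.
def pvSymbols : List Char := "qwertyuiopasdfghjklzxcvbnm0123456789_-".toList
def pvEmailSymbols : List Char := pvSymbols ++ ".@".toList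
def pvPasswordSymbols : List Char := pvSymbols ++ ".@!#$%^&*(),/".toList

-- A's 'for el in data: if el not in allowed: return False' loop; falling off the
-- loop reaches A's trailing 'return True'.
def pvLoopA (allowed : List Char) : List Char → Bool
  | [] => true
  | el :: rest => if allowed.contains el then pvLoopA allowed rest else false

def verify_data (data : String) (datatype : String) : Bool :=
  let l := data.toList
  if l.length < 64 ∧ l ≠ [] then        -- 'len(data) < 64 and data'
    if datatype == "email" then
      if ¬ l.contains '@' then false     -- "'@' not in data" (single-char membership)
      else pvLoopA pvEmailSymbols l
    else if datatype == "username" then pvLoopA pvSymbols l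
    else if datatype == "password" then pvLoopA pvPasswordSymbols l
    else true
  else false

-- ===== PORT B =====
-- Source B's regex character classes, ported as Boolean character-class predicates
-- (a regex engine is not available; '[a-z0-9_-]' etc. are exact on these classes);
-- fullmatch of '[class]*' over data = data.toList.all <class predicate>.
def pvClassBase (c : Char) : Bool := ('a' ≤ c && c ≤ 'z') || ('0' ≤ c && c ≤ '9') || c == '_' || c == '-'
def pvClassEmail (c : Char) : Bool := pvClassBase c || c == '.' || c == '@'
def pvClassPassword (c : Char) : Bool :=
  pvClassEmail c || c == '!' || c == '#' || c == '$' || c == '%' || c == '^' || c == '&' ||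
    c == '*' || c == '(' || c == ')' || c == ',' || c == '/'

def verify_data_alt (data : String) (datatype : String) : Bool :=
  let l := data.toList
  if l.isEmpty || !(decide (l.length < 64)) then false   -- 'if not data or len(data) >= 64'
  else if datatype == "email" then l.contains '@' && l.all pvClassEmail
  else if datatype == "username" then l.all pvClassBase    -- _RE.get(datatype) found
  else if datatype == "password" then l.all pvClassPassword
  else true                                               -- 'pat is None'

-- ===== PRECONDITION & SPEC =====
def Spec_verify_data (data : String) (datatype : String) (out : Bool) : Prop := out = verify_data_alt data datatype
instance (data : String) (datatype : String) (out : Bool) : Decidable (Spec_verify_data data datatype out) := by unfold Spec_verify_data; infer_instance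

-- ===== CLAIM (what is proved, stated in full; the proofs are below) =====
def Claim_equal_verify_data : Prop := ∀ (data : String) (datatype : String), Dom_verify_data data datatype → Spec_verify_data data datatype (verify_data data datatype)

-- ===== LEMMAS AND PROOFS =====
set_option maxRecDepth 10000

-- membership in A's symbol strings coincides with B's character classes, per character
lemma pv_char_base (c : Char) : pvSymbols.contains c = pvClassBase c := by
  have hb : ∀ (a b : Char), (a == b) = decide (a = b) := fun _ _ => rfl
  have h : pvSymbols = ['q','w','e','r','t','y','u','i','o','p','a','s','d','f','g','h','j','k','l','z','x','c','v','b','n','m','0','1','2','3','4','5','6','7','8','9','_','-'] := by decide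
  rcases c with ⟨v, hv⟩
  rw [h]
  simp only [pvClassBase, hb, List.contains, List.elem_eq_mem, List.mem_cons,
    List.not_mem_nil, or_false, Char.le_def, UInt32.le_iff_toNat_le, Char.ext_iff,
    UInt32.ext_iff, ← Bool.decide_and, ← Bool.decide_or]
  rw [decide_eq_decide]
  simp only [show ('q').val.toNat = 113 from rfl,
    show ('w').val.toNat = 119 from rfl,
    show ('e').val.toNat = 101 from rfl,
    show ('r').val.toNat = 114 from rfl,
    show ('t').val.toNat = 116 from rfl,
    show ('y').val.toNat = 121 from rfl,
    show ('u').val.toNat = 117 from rfl,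
    show ('i').val.toNat = 105 from rfl,
    show ('o').val.toNat = 111 from rfl,
    show ('p').val.toNat = 112 from rfl,
    show ('a').val.toNat = 97 from rfl,
    show ('s').val.toNat = 115 from rfl,
    show ('d').val.toNat = 100 from rfl,
    show ('f').val.toNat = 102 from rfl,
    show ('g').val.toNat = 103 from rfl,
    show ('h').val.toNat = 104 from rfl,
    show ('j').val.toNat = 106 from rfl,
    show ('k').val.toNat = 107 from rfl,
    show ('l').val.toNat = 108 from rfl,
    show ('z').val.toNat = 122 from rfl,
    show ('x').val.toNat = 120 from rfl,
    show ('c').val.toNat = 99 from rfl,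
    show ('v').val.toNat = 118 from rfl,
    show ('b').val.toNat = 98 from rfl,
    show ('n').val.toNat = 110 from rfl,
    show ('m').val.toNat = 109 from rfl,
    show ('0').val.toNat = 48 from rfl,
    show ('1').val.toNat = 49 from rfl,
    show ('2').val.toNat = 50 from rfl,
    show ('3').val.toNat = 51 from rfl,
    show ('4').val.toNat = 52 from rfl,
    show ('5').val.toNat = 53 from rfl,
    show ('6').val.toNat = 54 from rfl,
    show ('7').val.toNat = 55 from rfl,
    show ('8').val.toNat = 56 from rfl,
    show ('9').val.toNat = 57 from rfl,
    show ('_').val.toNat = 95 from rfl,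
    show ('-').val.toNat = 45 from rfl]
  omega

lemma pv_char_email (c : Char) : pvEmailSymbols.contains c = pvClassEmail c := by
  have hb : ∀ (a b : Char), (a == b) = decide (a = b) := fun _ _ => rfl
  have h : pvEmailSymbols = ['q','w','e','r','t','y','u','i','o','p','a','s','d','f','g','h','j','k','l','z','x','c','v','b','n','m','0','1','2','3','4','5','6','7','8','9','_','-','.','@'] := by decide
  rcases c with ⟨v, hv⟩
  rw [h]
  simp only [pvClassEmail, pvClassBase, hb, List.contains, List.elem_eq_mem, List.mem_cons,
    List.not_mem_nil, or_false, Char.le_def, UInt32.le_iff_toNat_le, Char.ext_iff,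
    UInt32.ext_iff, ← Bool.decide_and, ← Bool.decide_or]
  rw [decide_eq_decide]
  simp only [show ('q').val.toNat = 113 from rfl,
    show ('w').val.toNat = 119 from rfl,
    show ('e').val.toNat = 101 from rfl,
    show ('r').val.toNat = 114 from rfl,
    show ('t').val.toNat = 116 from rfl,
    show ('y').val.toNat = 121 from rfl,
    show ('u').val.toNat = 117 from rfl,
    show ('i').val.toNat = 105 from rfl,
    show ('o').val.toNat = 111 from rfl,
    show ('p').val.toNat = 112 from rfl,
    show ('a').val.toNat = 97 from rfl,
    show ('s').val.toNat = 115 from rfl,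
    show ('d').val.toNat = 100 from rfl,
    show ('f').val.toNat = 102 from rfl,
    show ('g').val.toNat = 103 from rfl,
    show ('h').val.toNat = 104 from rfl,
    show ('j').val.toNat = 106 from rfl,
    show ('k').val.toNat = 107 from rfl,
    show ('l').val.toNat = 108 from rfl,
    show ('z').val.toNat = 122 from rfl,
    show ('x').val.toNat = 120 from rfl,
    show ('c').val.toNat = 99 from rfl,
    show ('v').val.toNat = 118 from rfl,
    show ('b').val.toNat = 98 from rfl,
    show ('n').val.toNat = 110 from rfl,
    show ('m').val.toNat = 109 from rfl,
    show ('0').val.toNat = 48 from rfl,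
    show ('1').val.toNat = 49 from rfl,
    show ('2').val.toNat = 50 from rfl,
    show ('3').val.toNat = 51 from rfl,
    show ('4').val.toNat = 52 from rfl,
    show ('5').val.toNat = 53 from rfl,
    show ('6').val.toNat = 54 from rfl,
    show ('7').val.toNat = 55 from rfl,
    show ('8').val.toNat = 56 from rfl,
    show ('9').val.toNat = 57 from rfl,
    show ('_').val.toNat = 95 from rfl,
    show ('-').val.toNat = 45 from rfl,
    show ('.').val.toNat = 46 from rfl,
    show ('@').val.toNat = 64 from rfl]
  omega

lemma pv_char_password (c : Char) : pvPasswordSymbols.contains c = pvClassPassword c := by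
  have hb : ∀ (a b : Char), (a == b) = decide (a = b) := fun _ _ => rfl
  have h : pvPasswordSymbols = ['q','w','e','r','t','y','u','i','o','p','a','s','d','f','g','h','j','k','l','z','x','c','v','b','n','m','0','1','2','3','4','5','6','7','8','9','_','-','.','@','!','#','$','%','^','&','*','(',')',',','/'] := by decide
  rcases c with ⟨v, hv⟩
  rw [h]
  simp only [pvClassPassword, pvClassEmail, pvClassBase, hb, List.contains, List.elem_eq_mem,
    List.mem_cons, List.not_mem_nil, or_false, Char.le_def, UInt32.le_iff_toNat_le,
    Char.ext_iff, UInt32.ext_iff, ← Bool.decide_and, ← Bool.decide_or]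
  rw [decide_eq_decide]
  simp only [show ('q').val.toNat = 113 from rfl,
    show ('w').val.toNat = 119 from rfl,
    show ('e').val.toNat = 101 from rfl,
    show ('r').val.toNat = 114 from rfl,
    show ('t').val.toNat = 116 from rfl,
    show ('y').val.toNat = 121 from rfl,
    show ('u').val.toNat = 117 from rfl,
    show ('i').val.toNat = 105 from rfl,
    show ('o').val.toNat = 111 from rfl,
    show ('p').val.toNat = 112 from rfl,
    show ('a').val.toNat = 97 from rfl,
    show ('s').val.toNat = 115 from rfl,
    show ('d').val.toNat = 100 from rfl,
    show ('f').val.toNat = 102 from rfl,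
    show ('g').val.toNat = 103 from rfl,
    show ('h').val.toNat = 104 from rfl,
    show ('j').val.toNat = 106 from rfl,
    show ('k').val.toNat = 107 from rfl,
    show ('l').val.toNat = 108 from rfl,
    show ('z').val.toNat = 122 from rfl,
    show ('x').val.toNat = 120 from rfl,
    show ('c').val.toNat = 99 from rfl,
    show ('v').val.toNat = 118 from rfl,
    show ('b').val.toNat = 98 from rfl,
    show ('n').val.toNat = 110 from rfl,
    show ('m').val.toNat = 109 from rfl,
    show ('0').val.toNat = 48 from rfl,
    show ('1').val.toNat = 49 from rfl,
    show ('2').val.toNat = 50 from rfl,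
    show ('3').val.toNat = 51 from rfl,
    show ('4').val.toNat = 52 from rfl,
    show ('5').val.toNat = 53 from rfl,
    show ('6').val.toNat = 54 from rfl,
    show ('7').val.toNat = 55 from rfl,
    show ('8').val.toNat = 56 from rfl,
    show ('9').val.toNat = 57 from rfl,
    show ('_').val.toNat = 95 from rfl,
    show ('-').val.toNat = 45 from rfl,
    show ('.').val.toNat = 46 from rfl,
    show ('@').val.toNat = 64 from rfl,
    show ('!').val.toNat = 33 from rfl,
    show ('#').val.toNat = 35 from rfl,
    show ('$').val.toNat = 36 from rfl,
    show ('%').val.toNat = 37 from rfl,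
    show ('^').val.toNat = 94 from rfl,
    show ('&').val.toNat = 38 from rfl,
    show ('*').val.toNat = 42 from rfl,
    show ('(').val.toNat = 40 from rfl,
    show (')').val.toNat = 41 from rfl,
    show (',').val.toNat = 44 from rfl,
    show ('/').val.toNat = 47 from rfl]
  omega

-- A's early-return loop computes List.all of the membership test
lemma pvLoopA_eq_all (allowed : List Char) (l : List Char) :
    pvLoopA allowed l = l.all (fun c => allowed.contains c) := by
  induction l with
  | nil => rfl
  | cons el rest ih =>
    by_cases h : el ∈ allowed <;> simp [pvLoopA, List.all_cons, ih, h]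


lemma pvLoopA_base (l : List Char) : pvLoopA pvSymbols l = l.all pvClassBase := by
  rw [pvLoopA_eq_all]
  exact congrArg l.all (funext pv_char_base)

lemma pvLoopA_email (l : List Char) : pvLoopA pvEmailSymbols l = l.all pvClassEmail := by
  rw [pvLoopA_eq_all]
  exact congrArg l.all (funext pv_char_email)

lemma pvLoopA_password (l : List Char) : pvLoopA pvPasswordSymbols l = l.all pvClassPassword := by
  rw [pvLoopA_eq_all]
  exact congrArg l.all (funext pv_char_password)

-- ===== VERDICT (by name: the statement is the Claim_ definition above) =====
theorem verify_data_spec : Claim_equal_verify_data := by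
  intro data datatype _
  unfold Spec_verify_data verify_data verify_data_alt
  by_cases hlen : data.toList.length < 64 <;> by_cases hne : data.toList = [] <;>
    simp_all [List.isEmpty_iff, pvLoopA_base, pvLoopA_email, pvLoopA_password]
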